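-- pv_equiv track=rewrite | github.com/c4xuange/advent_of_code | 2018/day2.py | get_two_three_counts
-- ===== SOURCE A (Python) =====
-- def get_two_three_counts(word):
-- 	letter_count = {}
-- 	for letter in word:
-- 		if letter not in letter_count:
-- 			letter_count[letter] = 0
-- 		letter_count[letter] += 1
-- 	exactly_two = 0
-- 	exactly_three = 0
-- 	for letter in letter_count:
-- 		if letter_count[letter] == 2:
-- 			exactly_two = 1
-- 		elif letter_count[letter] == 3:
-- 			exactly_three = 1
-- 	return (exactly_two, exactly_three)
-- ===== SOURCE B (Python) =====
-- def get_two_three_counts(word):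
-- 	s = sorted(word)
-- 	runs = []
-- 	i = 0
-- 	n = len(s)
-- 	while i < n:
-- 		j = i
-- 		while j < n and s[j] == s[i]:
-- 			j += 1
-- 		runs.append(j - i)
-- 		i = j
-- 	return (int(2 in runs), int(3 in runs))
-- ===== Notes on version B (the rewrite author's own statement) =====
-- stated objective: alternative
-- what changed: B sorts the word and makes a single run-length scan over the sorted sequence, collecting the run lengths and testing whether 2 or 3 occurs, instead of A's hash-map frequency counting with a second flag-setting pass over the dict.
import Mathlib
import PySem

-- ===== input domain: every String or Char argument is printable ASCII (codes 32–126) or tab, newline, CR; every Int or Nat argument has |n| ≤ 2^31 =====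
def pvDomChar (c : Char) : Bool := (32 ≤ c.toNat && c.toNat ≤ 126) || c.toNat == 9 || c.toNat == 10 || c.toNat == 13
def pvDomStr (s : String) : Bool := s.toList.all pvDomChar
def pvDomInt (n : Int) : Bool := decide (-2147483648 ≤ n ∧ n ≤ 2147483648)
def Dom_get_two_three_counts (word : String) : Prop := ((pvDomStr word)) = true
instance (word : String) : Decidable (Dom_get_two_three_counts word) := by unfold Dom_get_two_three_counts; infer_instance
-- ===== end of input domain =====

-- B sorts the word and makes one run-length scan over the sorted sequence (runs of equal
-- letters), instead of A's dict frequency count plus flag pass: a different algorithm.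


-- ===== PORT A =====
def get_two_three_counts (word : String) : Int × Int :=
  let letter_count : PySem.Dict Char Int :=
    word.toList.foldl (fun d letter =>
      let d := if d.contains letter then d else d.insert letter 0
      d.modify letter 0 (· + 1)) PySem.Dict.empty
  letter_count.keys.foldl (fun p letter =>
    if letter_count.getD letter 0 = 2 then (1, p.2)
    else if letter_count.getD letter 0 = 3 then (p.1, 1)
    else p) (0, 0)

-- ===== PORT B =====
-- inner while loop of Source B: extend the current run of letter c (already of length n)
def runAux (c : Char) (n : Int) : List Char → List Int
  | [] => [n]
  | d :: t => if d = c then runAux c (n + 1) t else n :: runAux d 1 t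

-- outer while loop of Source B: collect the run lengths of the (sorted) sequence
def runLens : List Char → List Int
  | [] => []
  | c :: t => runAux c 1 t

def get_two_three_counts_alt (word : String) : Int × Int :=
  let s := PySem.List.sorted word.toList (fun x => x) false
  let runs := runLens s
  ((if (2 : Int) ∈ runs then 1 else 0), (if (3 : Int) ∈ runs then 1 else 0))

-- ===== PRECONDITION & SPEC =====
def Spec_get_two_three_counts (word : String) (out : Int × Int) : Prop := out = get_two_three_counts_alt word
instance (word : String) (out : Int × Int) : Decidable (Spec_get_two_three_counts word out) := by unfold Spec_get_two_three_counts; infer_instance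

-- ===== CLAIM (what is proved, stated in full; the proofs are below) =====
def Claim_equal_get_two_three_counts : Prop := ∀ (word : String), Dom_get_two_three_counts word → Spec_get_two_three_counts word (get_two_three_counts word)

-- ===== LEMMAS AND PROOFS =====

-- A's per-letter step ('if absent insert 0, then += 1') is Counter's step.
lemma body_eq_counter_body (d : PySem.Dict Char Int) (x : Char) :
    (let d' := if d.contains x then d else d.insert x 0
     d'.modify x 0 (· + 1)) = d.modify x 0 (· + 1) := by
  by_cases h : d.contains x = true
  · simp [h]
  · have hn : d.get? x = none :=
      (PySem.Dict.get?_eq_none_iff_contains d x).mpr (by simpa using h)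
    simp [h, PySem.Dict.modify, PySem.Dict.getD, hn, PySem.Dict.get?_insert_self,
      PySem.Dict.insert_insert_self]

lemma letter_count_eq_counter (l : List Char) :
    l.foldl (fun d letter =>
      let d := if d.contains letter then d else d.insert letter 0
      d.modify letter 0 (· + 1)) PySem.Dict.empty = PySem.Dict.counter l := by
  rw [PySem.Dict.counter_eq_foldl]
  congr 1
  funext d x
  exact body_eq_counter_body d x

-- the flag-setting fold, characterised by 'any'
lemma flag_fold (f : Char → Int) (l : List Char) (p : Int × Int) :
    l.foldl (fun p c => if f c = 2 then (1, p.2) else if f c = 3 then (p.1, 1) else p) p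
      = ((if l.any (fun c => f c == 2) then 1 else p.1),
         (if l.any (fun c => f c == 3) then 1 else p.2)) := by
  induction l generalizing p with
  | nil => simp
  | cons c t ih =>
    simp only [List.foldl_cons, List.any_cons, ih]
    by_cases h2 : f c = 2 <;> by_cases h3 : f c = 3 <;> simp [h2, h3]

-- membership in runAux on a sorted tail: the pending run ends at n + (count of c in t),
-- and the other runs are the counts of the remaining (larger) letters
lemma mem_runAux (c : Char) (n : Int) (t : List Char)
    (hs : t.Pairwise (· ≤ ·)) (hc : ∀ a ∈ t, c ≤ a) (m : Int) :
    m ∈ runAux c n t ↔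
      m = n + (t.count c : Int) ∨ ∃ a ∈ t, a ≠ c ∧ (t.count a : Int) = m := by
  induction t generalizing c n with
  | nil => simp [runAux]
  | cons d t' ih =>
    have hs' : t'.Pairwise (· ≤ ·) := hs.tail
    have hd : ∀ a ∈ t', d ≤ a := fun a ha => (List.pairwise_cons.mp hs).1 a ha
    by_cases hdc : d = c
    · subst hdc
      rw [runAux, if_pos rfl]
      rw [ih d (n + 1) hs' (fun a ha => hc a (List.mem_cons_of_mem _ ha))]
      constructor
      · rintro (h | ⟨a, ha, hac, hcnt⟩)
        · left; simp; omega
        · right; exact ⟨a, List.mem_cons_of_mem _ ha, hac,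
            by simpa [List.count_cons, Ne.symm hac] using hcnt⟩
      · rintro (h | ⟨a, ha, hac, hcnt⟩)
        · left; simp at h ⊢; omega
        · rcases List.mem_cons.mp ha with rfl | ha'
          · exact absurd rfl hac
          · right; exact ⟨a, ha', hac, by simpa [List.count_cons, hac, Ne.symm hac] using hcnt⟩
    · have hcd : c < d := lt_of_le_of_ne (hc d (List.mem_cons_self)) (Ne.symm hdc)
      have hcnot : c ∉ d :: t' := by
        intro hmem
        rcases List.mem_cons.mp hmem with rfl | h'
        · exact absurd rfl hdc
        · exact absurd (hd c h') (not_le.mpr hcd)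
      have hcount0 : (d :: t').count c = 0 := List.count_eq_zero.mpr hcnot
      rw [runAux]
      simp only [if_neg hdc]
      rw [List.mem_cons, ih d 1 hs' hd]
      constructor
      · rintro (rfl | h | ⟨a, ha, had, hcnt⟩)
        · left; rw [hcount0]; simp
        · right
          refine ⟨d, List.mem_cons_self, hdc, ?_⟩
          simp at h ⊢; omega
        · right
          have hac : a ≠ c := by
            intro rfl; exact absurd (hd a ha) (not_le.mpr hcd)
          exact ⟨a, List.mem_cons_of_mem _ ha, hac,
            by simpa [List.count_cons, had, Ne.symm had] using hcnt⟩
      · rintro (h | ⟨a, ha, hac, hcnt⟩)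
        · left; rw [hcount0] at h; simpa using h
        · rcases List.mem_cons.mp ha with rfl | ha'
          · right; left
            simp at hcnt ⊢; omega
          · by_cases had : a = d
            · subst had
              right; left
              simp at hcnt ⊢; omega
            · right; right
              exact ⟨a, ha', had, by simpa [List.count_cons, had, Ne.symm had] using hcnt⟩

-- run lengths of a sorted list are exactly the letter counts
lemma mem_runLens (l : List Char) (hs : l.Pairwise (· ≤ ·)) (m : Int) :
    m ∈ runLens l ↔ ∃ a ∈ l, (l.count a : Int) = m := by
  cases l with
  | nil => simp [runLens]
  | cons c t =>
    rw [runLens, mem_runAux c 1 t hs.tail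
      (fun a ha => (List.pairwise_cons.mp hs).1 a ha)]
    constructor
    · rintro (h | ⟨a, ha, hac, hcnt⟩)
      · exact ⟨c, List.mem_cons_self, by simp; omega⟩
      · exact ⟨a, List.mem_cons_of_mem _ ha,
          by simpa [List.count_cons, hac, Ne.symm hac] using hcnt⟩
    · rintro ⟨a, ha, hcnt⟩
      rcases List.mem_cons.mp ha with rfl | ha'
      · left; simp at hcnt ⊢; omega
      · by_cases hac : a = c
        · subst hac
          left; simp at hcnt ⊢; omega
        · right; exact ⟨a, ha', hac, by simpa [List.count_cons, hac, Ne.symm hac] using hcnt⟩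

-- both sides reduce to "some letter of the word occurs exactly n times"
lemma runLens_sorted_iff (l : List Char) (m : Int) :
    m ∈ runLens (PySem.List.sorted l (fun x => x) false) ↔
      ∃ a ∈ l, (l.count a : Int) = m := by
  have hperm := PySem.List.sorted_perm l (fun x => x) false
  rw [mem_runLens _ (by simpa using PySem.List.sorted_pairwise l (fun x => x))]
  constructor
  · rintro ⟨a, ha, hcnt⟩
    exact ⟨a, hperm.mem_iff.mp ha, by rwa [hperm.count_eq] at hcnt⟩
  · rintro ⟨a, ha, hcnt⟩
    exact ⟨a, hperm.mem_iff.mpr ha, by rwa [hperm.count_eq]⟩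

-- ===== VERDICT (by name: the statement is the Claim_ definition above) =====
theorem get_two_three_counts_spec : Claim_equal_get_two_three_counts := by
  intro word _
  unfold Spec_get_two_three_counts get_two_three_counts get_two_three_counts_alt
  simp only [letter_count_eq_counter]
  rw [show (fun (p : Int × Int) letter =>
        if (PySem.Dict.counter word.toList).getD letter 0 = 2 then ((1 : Int), p.2)
        else if (PySem.Dict.counter word.toList).getD letter 0 = 3 then (p.1, (1 : Int))
        else p)
      = (fun p c => if ((word.toList.count c : Int)) = 2 then (1, p.2)
          else if ((word.toList.count c : Int)) = 3 then (p.1, 1) else p) from by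
        funext p c; simp [PySem.Dict.getD_counter]]
  rw [flag_fold, PySem.Dict.keys_counter]
  have key : ∀ (n : Int),
      (((PySem.Set.ofList word.toList).any fun c => ((word.toList.count c : Int)) == n) = true)
        ↔ n ∈ runLens (PySem.List.sorted word.toList (fun x => x) false) := by
    intro n
    rw [runLens_sorted_iff]
    simp only [List.any_eq_true, beq_iff_eq, PySem.Set.mem_ofList]
  apply Prod.ext <;> simp only [key]
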